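-- pv_equiv track=rewrite | github.com/Persida-Team/Variants-and-Literature | variant_search/search.py | find_exact_match_in_rows
-- ===== SOURCE A (Python) =====
-- def find_exact_match_in_rows(table_rows, exact_match):
--     rows_to_return = []
--     for row in table_rows:
--         for key, value in row.items():
--             if exact_match in str(value):
--                 rows_to_return.append(row)
--     if rows_to_return:
--         return filter_duplicates(rows_to_return)
--
-- def filter_duplicates(dictionaries):
--     """
--     Filter out duplicate dictionaries from a list of dictionaries.
--     """
--     unique_dictionaries = []
--     seen = set()
--
--     for d in dictionaries:
--         t = tuple(sorted(d.items()))
--         if t not in seen: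
--             seen.add(t)
--             unique_dictionaries.append(d)
--
--     return unique_dictionaries
-- ===== SOURCE B (Python) =====
-- def find_exact_match_in_rows(table_rows, exact_match):
--     # one content-keyed pass: match-test and dedup fused; returns None when nothing matches
--     result = []
--     seen = set()
--     for row in table_rows:
--         if any(exact_match in str(v) for v in row.values()):
--             key = tuple(sorted(row.items()))
--             if key not in seen:
--                 seen.add(key)
--                 result.append(row)
--     return result or None
-- ===== Notes on version B (the rewrite author's own statement) =====
-- stated objective: simpler
-- what changed: A appends each matching row once per matching column and removes the duplicates in a second pass over that inflated list; B makes a single pass that tests each row once with any() and appends it at most once using a seen-key set, with no intermediate duplicate list and no helper.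
import Mathlib
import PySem

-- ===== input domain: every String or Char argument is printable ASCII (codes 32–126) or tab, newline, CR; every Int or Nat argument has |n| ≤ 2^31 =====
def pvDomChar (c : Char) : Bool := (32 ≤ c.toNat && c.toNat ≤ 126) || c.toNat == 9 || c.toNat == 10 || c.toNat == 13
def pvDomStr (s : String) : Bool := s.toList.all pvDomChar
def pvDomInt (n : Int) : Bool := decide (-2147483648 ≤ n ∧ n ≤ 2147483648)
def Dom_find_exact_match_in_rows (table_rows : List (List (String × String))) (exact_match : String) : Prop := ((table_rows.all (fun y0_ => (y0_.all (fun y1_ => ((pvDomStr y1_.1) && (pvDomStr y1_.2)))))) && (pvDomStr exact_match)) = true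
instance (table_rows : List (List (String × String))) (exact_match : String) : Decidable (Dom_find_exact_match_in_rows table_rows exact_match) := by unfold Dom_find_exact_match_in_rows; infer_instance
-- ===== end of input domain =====

-- B fuses A's append-once-per-matching-column pass and its separate dedup helper into one
-- content-keyed pass over the rows (objective: simpler; return value only, no mutation).


-- ===== PORT A =====
-- helper of A: filter_duplicates, dedup by tuple(sorted(d.items())) keeping first occurrences
def filter_duplicates (dictionaries : List (List (String × String))) : List (List (String × String)) :=
  (dictionaries.foldl
    (fun (st : List (List (String × String)) × PySem.Set (List (String × String))) d =>
      let t := PySem.List.sorted2 d Prod.fst Prod.snd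
      if PySem.Set.contains st.2 t then st
      else (st.1 ++ [d], PySem.Set.add st.2 t))
    ([], PySem.Set.empty)).1

def find_exact_match_in_rows (table_rows : List (List (String × String))) (exact_match : String) : Option (List (List (String × String))) :=
  let rows_to_return :=
    table_rows.foldl
      (fun acc row =>
        row.foldl
          (fun acc kv =>
            if PySem.Str.isIn exact_match kv.2 then acc ++ [row] else acc)
          acc)
      []
  if rows_to_return = [] then none else some (filter_duplicates rows_to_return)

-- ===== PORT B =====
def find_exact_match_in_rows_alt (table_rows : List (List (String × String))) (exact_match : String) : Option (List (List (String × String))) :=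
  let st :=
    table_rows.foldl
      (fun (st : List (List (String × String)) × PySem.Set (List (String × String))) row =>
        if row.any (fun kv => PySem.Str.isIn exact_match kv.2) then
          let key := PySem.List.sorted2 row Prod.fst Prod.snd
          if PySem.Set.contains st.2 key then st
          else (st.1 ++ [row], PySem.Set.add st.2 key)
        else st)
      ([], PySem.Set.empty)
  if st.1 = [] then none else some st.1

-- ===== PRECONDITION & SPEC =====
def Spec_find_exact_match_in_rows (table_rows : List (List (String × String))) (exact_match : String) (out : Option (List (List (String × String)))) : Prop := out = find_exact_match_in_rows_alt table_rows exact_match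
instance (table_rows : List (List (String × String))) (exact_match : String) (out : Option (List (List (String × String)))) : Decidable (Spec_find_exact_match_in_rows table_rows exact_match out) := by unfold Spec_find_exact_match_in_rows; infer_instance

-- ===== CLAIM (what is proved, stated in full; the proofs are below) =====
def Claim_equal_find_exact_match_in_rows : Prop := ∀ (table_rows : List (List (String × String))) (exact_match : String), Dom_find_exact_match_in_rows table_rows exact_match → Spec_find_exact_match_in_rows table_rows exact_match (find_exact_match_in_rows table_rows exact_match)

-- ===== LEMMAS AND PROOFS =====

-- abbreviations used only by the proofs
def pvKey (r : List (String × String)) : List (String × String) :=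
  PySem.List.sorted2 r Prod.fst Prod.snd

def pvMatch (m : String) (r : List (String × String)) : Bool :=
  r.any (fun kv => PySem.Str.isIn m kv.2)

-- the dedup step of A's filter_duplicates
def pvF (st : List (List (String × String)) × PySem.Set (List (String × String)))
    (d : List (String × String)) :
    List (List (String × String)) × PySem.Set (List (String × String)) :=
  if PySem.Set.contains st.2 (pvKey d) then st
  else (st.1 ++ [d], PySem.Set.add st.2 (pvKey d))

-- B's fused step
def pvG (m : String)
    (st : List (List (String × String)) × PySem.Set (List (String × String)))
    (row : List (String × String)) :
    List (List (String × String)) × PySem.Set (List (String × String)) :=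
  if pvMatch m row then pvF st row else st

lemma contains_add_self (s : PySem.Set (List (String × String))) (x : List (String × String)) :
    PySem.Set.contains (PySem.Set.add s x) x = true := by
  simp [PySem.Set.mem_add]

-- replicated copies of an already-seen key are skipped
lemma pvF_replicate (n : Nat) (r : List (String × String))
    (st : List (List (String × String)) × PySem.Set (List (String × String)))
    (h : PySem.Set.contains st.2 (pvKey r) = true) :
    (List.replicate n r).foldl pvF st = st := by
  rw [PySem.Set.contains_iff] at h
  induction n with
  | zero => rfl
  | succ n ih => simp [List.replicate_succ, List.foldl_cons, pvF, h, ih]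

lemma pvF_keeps_seen (st : List (List (String × String)) × PySem.Set (List (String × String)))
    (r : List (String × String)) :
    PySem.Set.contains (pvF st r).2 (pvKey r) = true := by
  unfold pvF
  split_ifs with h
  · exact h
  · exact contains_add_self _ _

-- dedup over the flatMap-expanded list is B's fused loop
lemma main_fold (m : String) (tr : List (List (String × String)))
    (st : List (List (String × String)) × PySem.Set (List (String × String))) :
    (tr.flatMap (fun row => (row.filter (fun kv => PySem.Str.isIn m kv.2)).map (fun _ => row))).foldl pvF st
      = tr.foldl (pvG m) st := by
  induction tr generalizing st with
  | nil => rfl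
  | cons r tr ih =>
    simp only [List.flatMap_cons, List.foldl_append, List.foldl_cons]
    by_cases h : pvMatch m r = true
    · have hne : (r.filter (fun kv => PySem.Str.isIn m kv.2)) ≠ [] := by
        simpa [pvMatch, List.any_eq_true, List.filter_eq_nil_iff] using h
      obtain ⟨a, as, hcons⟩ := List.exists_cons_of_ne_nil hne
      rw [hcons]
      simp only [List.map_cons, List.foldl_cons]
      have : (as.map (fun _ => r)) = List.replicate as.length r := by
        simp
      rw [this, pvF_replicate _ _ _ (pvF_keeps_seen st r), ih, pvG, if_pos h]
    · have : (r.filter (fun kv => PySem.Str.isIn m kv.2)) = [] := by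
        simpa [pvMatch, List.any_eq_true, List.filter_eq_nil_iff] using h
      rw [this]
      simp only [List.map_nil, List.foldl_nil, ih, pvG, if_neg h]

-- the appended list only grows
lemma pvG_prefix (m : String) (tr : List (List (String × String)))
    (st : List (List (String × String)) × PySem.Set (List (String × String))) :
    st.1 <+: (tr.foldl (pvG m) st).1 := by
  induction tr generalizing st with
  | nil => exact List.prefix_rfl
  | cons r tr ih =>
    refine List.IsPrefix.trans ?_ (ih (pvG m st r))
    unfold pvG pvF
    split
    · split
      · exact List.prefix_rfl
      · exact ⟨[r], rfl⟩
    · exact List.prefix_rfl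

lemma pvG_empty_iff (m : String) (tr : List (List (String × String))) :
    (tr.foldl (pvG m) ([], PySem.Set.empty)).1 = [] ↔ ∀ r ∈ tr, pvMatch m r = false := by
  induction tr with
  | nil => simp
  | cons r tr ih =>
    simp only [List.foldl_cons, List.mem_cons]
    by_cases h : pvMatch m r = true
    · constructor
      · intro hempty
        have hpre := pvG_prefix m tr (pvG m ([], PySem.Set.empty) r)
        have : (pvG m ([], PySem.Set.empty) r).1 = [r] := by
          simp [pvG, pvF, h, PySem.Set.empty]
        rw [this] at hpre
        rw [hempty] at hpre
        exact absurd (List.IsPrefix.sublist hpre).length_le (by simp)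
      · intro hall
        exact absurd h (by simp [hall r (Or.inl rfl)])
    · have h' : pvMatch m r = false := by simpa using h
      rw [show pvG m ([], PySem.Set.empty) r = ([], PySem.Set.empty) by simp [pvG, h']]
      rw [ih]
      constructor
      · intro hall x hx
        rcases hx with rfl | hx
        · exact h'
        · exact hall x hx
      · intro hall x hx
        exact hall x (Or.inr hx)

-- ===== VERDICT (by name: the statement is the Claim_ definition above) =====
lemma hflat_iff (m : String) (tr : List (List (String × String))) :
    ((tr.flatMap (fun row => (row.filter (fun kv => PySem.Str.isIn m kv.2)).map (fun _ => row))) = [])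
      ↔ (∀ r ∈ tr, pvMatch m r = false) := by
  simp [pvMatch, List.filter_eq_nil_iff]

theorem find_exact_match_in_rows_spec : Claim_equal_find_exact_match_in_rows := by
  intro tr m _
  unfold Spec_find_exact_match_in_rows
  have hrows : (tr.foldl
      (fun acc row => row.foldl
        (fun acc kv => if PySem.Str.isIn m kv.2 then acc ++ [row] else acc) acc)
      ([] : List (List (String × String))))
      = tr.flatMap (fun row => (row.filter (fun kv => PySem.Str.isIn m kv.2)).map (fun _ => row)) := by
    have h1 : (fun (acc : List (List (String × String))) (row : List (String × String)) =>
          row.foldl (fun acc kv => if PySem.Str.isIn m kv.2 then acc ++ [row] else acc) acc)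
        = (fun acc row => acc ++ (row.filter (fun kv => PySem.Str.isIn m kv.2)).map (fun _ => row)) := by
      funext acc row
      simp only [PySem.List.foldl_append_if]
    rw [h1, PySem.List.foldl_append_eq_flatMap, List.nil_append]
  show (if (tr.foldl
      (fun acc row => row.foldl
        (fun acc kv => if PySem.Str.isIn m kv.2 then acc ++ [row] else acc) acc)
      ([] : List (List (String × String)))) = []
    then none
    else some (((tr.foldl
      (fun acc row => row.foldl
        (fun acc kv => if PySem.Str.isIn m kv.2 then acc ++ [row] else acc) acc)
      ([] : List (List (String × String)))).foldl pvF ([], PySem.Set.empty)).1))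
    = (if (tr.foldl (pvG m) ([], PySem.Set.empty)).1 = []
       then none
       else some (tr.foldl (pvG m) ([], PySem.Set.empty)).1)
  rw [hrows, main_fold]
  rcases Classical.em (∀ r ∈ tr, pvMatch m r = false) with hc | hc
  · rw [if_pos ((hflat_iff m tr).mpr hc), if_pos ((pvG_empty_iff m tr).mpr hc)]
  · rw [if_neg (fun h => hc ((hflat_iff m tr).mp h)),
        if_neg (fun h => hc ((pvG_empty_iff m tr).mp h))]
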